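-- pv_equiv track=rewrite | github.com/Tauwasser/AoC2019 | day1.py | part2
-- ===== SOURCE A (Python) =====
-- from typing import Dict, List, Optional, Tuple
--
-- def part2(lines: List[str]) -> List[int]:
--
--     values = []
--
--     pattern = {
--         '1': 1, 'one':   1,
--         '2': 2, 'two':   2,
--         '3': 3, 'three': 3,
--         '4': 4, 'four':  4,
--         '5': 5, 'five':  5,
--         '6': 6, 'six':   6,
--         '7': 7, 'seven': 7,
--         '8': 8, 'eight': 8,
--         '9': 9, 'nine':  9,
--     }
--
--     for line in lines:
--         num0 = next(iter(sorted(filter(lambda vi: vi[1] >= 0, ((value, line.find(key)) for key, value in pattern.items())), key=lambda vi: vi[1])), None)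
--         num1 = next(iter(sorted(filter(lambda vi: vi[1] >= 0, ((value, line.rfind(key)) for key, value in pattern.items())), key=lambda vi: -vi[1])), None)
--         if (num0 is None):
--             raise RuntimeError(f'No number found in line {line}!')
--         num = num0[0] * 10 + (num1 or num0)[0]
--         values.append(num)
--
--     return values
-- ===== SOURCE B (Python) =====
-- from typing import List
--
-- def part2(lines: List[str]) -> List[int]:
--
--     values = []
--
--     pattern = {
--         '1': 1, 'one':   1,
--         '2': 2, 'two':   2,
--         '3': 3, 'three': 3,
--         '4': 4, 'four':  4,
--         '5': 5, 'five':  5,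
--         '6': 6, 'six':   6,
--         '7': 7, 'seven': 7,
--         '8': 8, 'eight': 8,
--         '9': 9, 'nine':  9,
--     }
--
--     for line in lines:
--         first = None
--         last = None
--         for i in range(len(line)):
--             for key, value in pattern.items():
--                 if line.startswith(key, i):
--                     if first is None:
--                         first = value
--                     last = value
--         if first is None:
--             raise RuntimeError(f'No number found in line {line}!')
--         values.append(first * 10 + last)
--
--     return values
-- ===== Notes on version B (the rewrite author's own statement) =====
-- stated objective: idiomatic
-- what changed: Replaces A's per-key find/rfind scans (18 keys, two generator pipelines, filters and two stable sorts per line) by a single left-to-right positional pass per line that checks line.startswith(key, i) at each index and records the first and last match; Pre_ excludes lines containing no digit/digit-word, on which both A and B raise RuntimeError.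
import Mathlib
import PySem

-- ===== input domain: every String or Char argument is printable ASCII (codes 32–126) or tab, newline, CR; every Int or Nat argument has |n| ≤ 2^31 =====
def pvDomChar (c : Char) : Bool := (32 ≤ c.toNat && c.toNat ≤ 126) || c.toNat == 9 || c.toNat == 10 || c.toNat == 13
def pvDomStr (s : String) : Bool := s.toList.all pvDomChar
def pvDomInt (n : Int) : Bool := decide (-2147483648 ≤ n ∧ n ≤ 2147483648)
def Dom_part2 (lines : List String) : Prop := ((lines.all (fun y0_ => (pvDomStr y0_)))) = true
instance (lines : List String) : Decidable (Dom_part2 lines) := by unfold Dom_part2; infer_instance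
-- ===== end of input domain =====

-- B replaces A's 18 per-key find/rfind scans plus two sorts per line by one left-to-right
-- positional pass recording the first and last pattern match (idiomatic; same asymptotic cost).

-- ===== PORT A =====
-- the pattern dict (only iterated via .items(), in insertion order)
def pvPattern : List (String × Int) :=
  [("1",1),("one",1),("2",2),("two",2),("3",3),("three",3),("4",4),("four",4),("5",5),
   ("five",5),("6",6),("six",6),("7",7),("seven",7),("8",8),("eight",8),("9",9),("nine",9)]

def part2Line (line : String) : Int :=
  let num0 := (PySem.List.sorted
    ((pvPattern.map (fun kv => (kv.2, PySem.Str.find line kv.1))).filter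
      (fun vi => decide (0 ≤ vi.2))) (fun vi => vi.2) false).head?
  let num1 := (PySem.List.sorted
    ((pvPattern.map (fun kv => (kv.2, PySem.Str.rfind line kv.1))).filter
      (fun vi => decide (0 ≤ vi.2))) (fun vi => -vi.2) false).head?
  match num0 with
  | none => 0      -- Python raises RuntimeError here; such lines are excluded by Pre_part2
  | some a => a.1 * 10 + (num1.getD a).1

def part2 (lines : List String) : List Int :=
  lines.foldl (fun values line => values ++ [part2Line line]) []

-- ===== PORT B =====
def part2AltLine (line : String) : Int :=
  let st := (PySem.List.pyRange 0 (PySem.Str.len line) 1).foldl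
    (fun (st : Option Int × Option Int) i =>
      pvPattern.foldl
        (fun (st2 : Option Int × Option Int) kv =>
          -- line.startswith(key, i) = key is a prefix of line[i:]  (exact: 0 ≤ i ≤ len(line))
          if PySem.Chars.startswith (line.toList.drop i.toNat) kv.1.toList then
            ((match st2.1 with | none => some kv.2 | some f => some f), some kv.2)
          else st2) st)
    (none, none)
  match st.1, st.2 with
  | some f, some l => f * 10 + l
  | _, _ => -1     -- Python raises RuntimeError here; such lines are excluded by Pre_part2

def part2_alt (lines : List String) : List Int :=
  lines.foldl (fun values line => values ++ [part2AltLine line]) []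

-- ===== PRECONDITION & SPEC =====
-- Pre_ excludes exactly the inputs with a line containing no digit and no digit word,
-- on which the Python A (and B) raise RuntimeError.
def Pre_part2 (lines : List String) : Prop :=
  ∀ line ∈ lines, ∃ kv ∈ pvPattern, PySem.Str.isIn kv.1 line = true
instance (lines : List String) : Decidable (Pre_part2 lines) := by unfold Pre_part2; infer_instance

def pvWitness_part2 : List String := ["two1nine", "xxseven"]

def Spec_part2 (lines : List String) (out : List Int) : Prop := out = part2_alt lines
instance (lines : List String) (out : List Int) : Decidable (Spec_part2 lines out) := by unfold Spec_part2; infer_instance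

-- ===== CLAIM (what is proved, stated in full; the proofs are below) =====
def Claim_equal_part2 : Prop := ∀ (lines : List String), Dom_part2 lines → Pre_part2 lines → Spec_part2 lines (part2 lines)

-- ===== LEMMAS AND PROOFS =====

-- the per-index match: first (here: only) pattern entry whose key starts at position i of s
def pvG (s : List Char) (i : Nat) : Option Int :=
  (pvPattern.find? (fun kv => PySem.Chars.startswith (s.drop i) kv.1.toList)).map (fun kv => kv.2)

theorem pv_key_ne_nil : ∀ kv ∈ pvPattern, kv.1.toList ≠ [] := by decide

theorem pv_prefix_eq : ∀ kv1 ∈ pvPattern, ∀ kv2 ∈ pvPattern,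
    kv1.1.toList.isPrefixOf kv2.1.toList = true → kv1 = kv2 := by decide

-- at most one pattern key matches at a given position
theorem pv_uniq {t : List Char} {kv1 kv2 : String × Int} (h1 : kv1 ∈ pvPattern)
    (h2 : kv2 ∈ pvPattern) (hp1 : kv1.1.toList <+: t) (hp2 : kv2.1.toList <+: t) :
    kv1 = kv2 := by
  rcases List.prefix_or_prefix_of_prefix hp1 hp2 with h | h
  · exact pv_prefix_eq kv1 h1 kv2 h2 (List.isPrefixOf_iff_prefix.mpr h)
  · exact (pv_prefix_eq kv2 h2 kv1 h1 (List.isPrefixOf_iff_prefix.mpr h)).symm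

theorem pv_nodup : pvPattern.Pairwise (· ≠ ·) := by decide

-- a matching position lies strictly inside s
theorem pv_lt_of_isSome {s : List Char} {i : Nat} (h : (pvG s i).isSome = true) :
    i < s.length := by
  by_contra hge
  push Not at hge
  rw [Option.isSome_iff_exists] at h
  obtain ⟨v, hv⟩ := h
  unfold pvG at hv
  rw [Option.map_eq_some_iff] at hv
  obtain ⟨kv, hfind, _⟩ := hv
  have hmem := List.mem_of_find?_eq_some hfind
  have hpred := List.find?_some hfind
  rw [PySem.Chars.startswith_iff] at hpred
  rw [List.drop_eq_nil_of_le hge] at hpred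
  exact pv_key_ne_nil kv hmem (List.prefix_nil.mp hpred)


theorem pv_fold_no_match (pred : String × Int → Bool)
    (step : (Option Int × Option Int) → (String × Int) → (Option Int × Option Int))
    (hstep : ∀ st kv, pred kv = false → step st kv = st) :
    ∀ (L : List (String × Int)), (∀ kv ∈ L, pred kv = false) →
    ∀ st, L.foldl step st = st := by
  intro L
  induction L with
  | nil => intro _ st; rfl
  | cons a L ih =>
    intro hall st
    rw [List.foldl_cons, hstep st a (hall a (by simp))]
    exact ih (fun kv hkv => hall kv (by simp [hkv])) st

theorem pv_inner_fold_gen (pred : String × Int → Bool) :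
    ∀ (L : List (String × Int)),
    L.Pairwise (fun a b => ¬(pred a = true ∧ pred b = true)) →
    ∀ (st : Option Int × Option Int),
    L.foldl
      (fun (st2 : Option Int × Option Int) kv =>
        if pred kv then
          ((match st2.1 with | none => some kv.2 | some f => some f), some kv.2)
        else st2) st
    = match (L.find? pred).map (fun kv => kv.2) with
      | none => st
      | some v => ((match st.1 with | none => some v | some f => some f), some v) := by
  intro L
  induction L with
  | nil => intro _ st; rfl
  | cons a L ih =>
    intro hpw st
    rcases List.pairwise_cons.mp hpw with ⟨hhead, htail⟩
    cases ha : pred a with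
    | false =>
      rw [List.foldl_cons, List.find?_cons_of_neg (by simp [ha])]
      simp only [ha, Bool.false_eq_true, if_false]
      exact ih htail st
    | true =>
      rw [List.foldl_cons, List.find?_cons_of_pos ha]
      simp only [ha, if_true]
      rw [pv_fold_no_match pred _ (fun st kv hkv => by simp [hkv]) L
        (fun kv hkv => by
          have := hhead kv hkv
          cases hk : pred kv
          · rfl
          · exact absurd ⟨ha, hk⟩ this) _]
      rfl

-- B's inner loop over the pattern = lookup of the (unique) match
theorem pv_inner_fold (t : List Char) (st : Option Int × Option Int) :
    pvPattern.foldl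
      (fun (st2 : Option Int × Option Int) kv =>
        if PySem.Chars.startswith t kv.1.toList then
          ((match st2.1 with | none => some kv.2 | some f => some f), some kv.2)
        else st2) st
    = match (pvPattern.find? (fun kv => PySem.Chars.startswith t kv.1.toList)).map
        (fun kv => kv.2) with
      | none => st
      | some v => ((match st.1 with | none => some v | some f => some f), some v) := by
  apply pv_inner_fold_gen
  exact pv_nodup.imp_of_mem (fun {a b} ha hb hne hpp => by
    rcases hpp with ⟨hpa, hpb⟩
    rw [PySem.Chars.startswith_iff] at hpa hpb
    exact hne (pv_uniq ha hb hpa hpb))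

-- B's outer loop collects head/getLast of the per-index matches
theorem pv_outer_fold (g : Nat → Option Int) :
    ∀ (I : List Nat) (f l : Option Int),
    I.foldl (fun (st : Option Int × Option Int) i =>
        match g i with
        | none => st
        | some v => ((match st.1 with | none => some v | some f' => some f'), some v)) (f, l)
    = (f.or ((I.filterMap g).head?), ((I.filterMap g).getLast?).or l) := by
  intro I
  induction I with
  | nil => intro f l; simp
  | cons i I ih =>
    intro f l
    rw [List.foldl_cons]
    cases hgi : g i with
    | none => simp only [List.filterMap_cons, hgi]; exact ih f l
    | some v =>
      simp only [List.filterMap_cons, hgi]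
      have hm : (match f with | none => some v | some f' => some f') = f.or (some v) := by
        cases f <;> rfl
      rw [hm, ih (f.or (some v)) (some v), Prod.mk.injEq]
      constructor
      · rw [Option.or_assoc]
        cases hfm : (I.filterMap g) with
        | nil => simp
        | cons a as => simp
      · cases hfm : (I.filterMap g) with
        | nil => simp
        | cons a as =>
          cases hlast : (a :: as).getLast? with
          | none => exact absurd (List.getLast?_eq_none_iff.mp hlast) (by simp)
          | some w => simp only [List.getLast?_cons_cons, hlast, Option.some_or]

theorem pv_head_filterMap_range {g : Nat → Option Int} {n i : Nat} {v : Int}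
    (hin : i < n) (hg : g i = some v) (hmin : ∀ j, j < i → g j = none) :
    ((List.range n).filterMap g).head? = some v := by
  induction n with
  | zero => omega
  | succ n ih =>
    rw [List.range_succ, List.filterMap_append, List.head?_append]
    rcases Nat.lt_succ_iff_lt_or_eq.mp hin with h | h
    · rw [ih h, Option.some_or]
    · subst h
      rw [List.filterMap_eq_nil_iff.mpr (fun j hj => hmin j (List.mem_range.mp hj))]
      simp [hg]

theorem pv_getLast_filterMap_range {g : Nat → Option Int} {n i : Nat} {v : Int}
    (hin : i < n) (hg : g i = some v) (hmax : ∀ j, i < j → j < n → g j = none) :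
    ((List.range n).filterMap g).getLast? = some v := by
  induction n with
  | zero => omega
  | succ n ih =>
    rw [List.range_succ, List.filterMap_append]
    rcases Nat.lt_succ_iff_lt_or_eq.mp hin with h | h
    · rw [show List.filterMap g [n] = [] by simp [hmax n h (Nat.lt_succ_self n)]]
      rw [List.append_nil]
      exact ih h (fun j hji hjn => hmax j hji (Nat.lt_succ_of_lt hjn))
    · subst h
      rw [show List.filterMap g [i] = [v] by simp [hg]]
      exact List.getLast?_concat

-- rfind returns the greatest matching position ≤ k (or -1)
theorem pv_rfindGo_cases (s sub : List Char) : ∀ (k : Nat),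
    (PySem.Chars.rfind.go s sub k = -1 ∧ ∀ j ≤ k, ¬ sub <+: s.drop j) ∨
    (∃ j, j ≤ k ∧ PySem.Chars.rfind.go s sub k = (j : Int) ∧ sub <+: s.drop j ∧
      ∀ j', j < j' → j' ≤ k → ¬ sub <+: s.drop j') := by
  intro k
  induction k with
  | zero =>
    cases hp : sub.isPrefixOf s with
    | false =>
      left
      refine ⟨by simp [PySem.Chars.rfind.go, hp], ?_⟩
      intro j hj
      interval_cases j
      simpa using (List.isPrefixOf_iff_prefix (l₁ := sub) (l₂ := s)).not.mp (by simp [hp])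
    | true =>
      right
      exact ⟨0, le_refl 0, by simp [PySem.Chars.rfind.go, hp],
        by simpa using List.isPrefixOf_iff_prefix.mp hp, by omega⟩
  | succ k ih =>
    cases hp : sub.isPrefixOf (s.drop (k+1)) with
    | true =>
      right
      refine ⟨k+1, le_refl _, ?_, List.isPrefixOf_iff_prefix.mp hp, by omega⟩
      simp [PySem.Chars.rfind.go, hp]
    | false =>
      have hno : ¬ sub <+: s.drop (k+1) := by
        simpa using (List.isPrefixOf_iff_prefix (l₁ := sub) (l₂ := s.drop (k+1))).not.mp (by simp [hp])
      have hgo : PySem.Chars.rfind.go s sub (k+1) = PySem.Chars.rfind.go s sub k := by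
        simp [PySem.Chars.rfind.go, hp]
      rcases ih with ⟨h1, h2⟩ | ⟨j, hjk, hj1, hj2, hj3⟩
      · left
        refine ⟨hgo.trans h1, fun j hj => ?_⟩
        rcases Nat.lt_succ_iff_lt_or_eq.mp (Nat.lt_succ_of_le hj) with h | h
        · exact h2 j (by omega)
        · subst h; exact hno
      · right
        refine ⟨j, by omega, hgo.trans hj1, hj2, fun j' hj' hj'k => ?_⟩
        rcases Nat.lt_succ_iff_lt_or_eq.mp (Nat.lt_succ_of_le hj'k) with h | h
        · exact hj3 j' hj' (by omega)
        · subst h; exact hno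


-- char-list versions of the two per-line computations
def pvCands0 (s : List Char) : List (Int × Int) :=
  (pvPattern.map (fun kv => (kv.2, PySem.Chars.find s kv.1.toList))).filter
    (fun vi => decide (0 ≤ vi.2))

def pvCands1 (s : List Char) : List (Int × Int) :=
  (pvPattern.map (fun kv => (kv.2, PySem.Chars.rfind s kv.1.toList))).filter
    (fun vi => decide (0 ≤ vi.2))

def pvALine (s : List Char) : Int :=
  match (PySem.List.sorted (pvCands0 s) (fun vi => vi.2) false).head? with
  | none => 0
  | some a =>
      a.1 * 10 + (((PySem.List.sorted (pvCands1 s) (fun vi => -vi.2) false).head?).getD a).1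

def pvBLine (s : List Char) : Int :=
  let st := (PySem.List.pyRange 0 ((s.length : Int)) 1).foldl
    (fun (st : Option Int × Option Int) i =>
      pvPattern.foldl
        (fun (st2 : Option Int × Option Int) kv =>
          if PySem.Chars.startswith (s.drop i.toNat) kv.1.toList then
            ((match st2.1 with | none => some kv.2 | some f => some f), some kv.2)
          else st2) st)
    (none, none)
  match st.1, st.2 with
  | some f, some l => f * 10 + l
  | _, _ => -1

theorem part2Line_eq (line : String) : part2Line line = pvALine line.toList := by
  simp only [part2Line, pvALine, pvCands0, pvCands1, PySem.Str.find_eq, PySem.Str.rfind_eq]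

theorem part2AltLine_eq (line : String) : part2AltLine line = pvBLine line.toList := by
  simp only [part2AltLine, pvBLine, PySem.Str.len_eq]

theorem pv_match_at {s : List Char} {i : Nat} {kv : String × Int} (hmem : kv ∈ pvPattern)
    (hp : kv.1.toList <+: s.drop i) : (pvG s i).isSome = true := by
  simp only [pvG, Option.isSome_map, List.find?_isSome]
  exact ⟨kv, hmem, (PySem.Chars.startswith_iff _ _).mpr hp⟩

theorem pv_g_some_elim {s : List Char} {i : Nat} (h : (pvG s i).isSome = true) :
    ∃ kv ∈ pvPattern, kv.1.toList <+: s.drop i ∧ pvG s i = some kv.2 := by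
  unfold pvG at h
  cases hf : pvPattern.find? (fun kv => PySem.Chars.startswith (s.drop i) kv.1.toList) with
  | none => rw [hf] at h; simp at h
  | some kv =>
    have hp := List.find?_some hf
    exact ⟨kv, List.mem_of_find?_eq_some hf,
      (PySem.Chars.startswith_iff _ _).mp hp, by simp [pvG, hf]⟩

theorem pv_rfind_nonneg {s sub : List Char} {j : Nat} (hj : j ≤ s.length)
    (hp : sub <+: s.drop j) : 0 ≤ PySem.Chars.rfind s sub := by
  unfold PySem.Chars.rfind
  rcases pv_rfindGo_cases s sub s.length with ⟨h1, h2⟩ | ⟨jj, _, heq, _, _⟩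
  · exact absurd hp (h2 j hj)
  · rw [heq]; exact Int.natCast_nonneg jj

theorem pv_rfind_elim {s sub : List Char} (h : 0 ≤ PySem.Chars.rfind s sub) :
    ∃ jj, jj ≤ s.length ∧ PySem.Chars.rfind s sub = (jj : Int) ∧ sub <+: s.drop jj ∧
      ∀ j', jj < j' → j' ≤ s.length → ¬ sub <+: s.drop j' := by
  unfold PySem.Chars.rfind at h ⊢
  rcases pv_rfindGo_cases s sub s.length with ⟨h1, _⟩ | ⟨jj, hjle, heq, hjp, hjmax⟩
  · rw [h1] at h; norm_num at h
  · exact ⟨jj, hjle, heq, hjp, hjmax⟩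

theorem pv_core (s : List Char) (hex : ∃ i, (pvG s i).isSome = true) :
    pvALine s = pvBLine s := by
  classical
  -- the first and last matching positions
  have hP0 : (pvG s (Nat.find hex)).isSome = true := Nat.find_spec hex
  set i0 := Nat.find hex with hi0def
  set i1 := Nat.findGreatest (fun i => (pvG s i).isSome = true) s.length with hi1def
  have h0lt : i0 < s.length := pv_lt_of_isSome hP0
  have hP1 : (pvG s i1).isSome = true := by
    obtain ⟨i, hi⟩ := hex
    exact Nat.findGreatest_spec (P := fun i => (pvG s i).isSome = true) (le_of_lt (pv_lt_of_isSome hi)) hi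
  have h1lt : i1 < s.length := pv_lt_of_isSome hP1
  have hmin : ∀ j, j < i0 → pvG s j = none := fun j hj =>
    Option.not_isSome_iff_eq_none.mp (Nat.find_min hex hj)
  have hmax : ∀ j, i1 < j → j ≤ s.length → pvG s j = none := fun j h1 h2 =>
    Option.not_isSome_iff_eq_none.mp (Nat.findGreatest_is_greatest h1 h2)
  obtain ⟨kv0, hkv0mem, hkv0p, hg0⟩ := pv_g_some_elim hP0
  obtain ⟨kv1, hkv1mem, hkv1p, hg1⟩ := pv_g_some_elim hP1
  -- A side: the head of each sorted candidate list
  have hfind0v : PySem.Chars.find s kv0.1.toList = (i0 : Int) := by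
    have hnn : 0 ≤ PySem.Chars.find s kv0.1.toList :=
      (PySem.Chars.find_nonneg_iff _ _).mpr
        (hkv0p.isInfix.trans (List.drop_suffix i0 s).isInfix)
    obtain ⟨hpf, hminf⟩ := PySem.Chars.find_spec hnn
    have htn1 : (PySem.Chars.find s kv0.1.toList).toNat ≤ i0 := by
      by_contra hcon
      exact hminf i0 (by omega) hkv0p
    have htn2 : i0 ≤ (PySem.Chars.find s kv0.1.toList).toNat :=
      Nat.find_min' hex (pv_match_at hkv0mem hpf)
    have := Int.toNat_of_nonneg hnn
    omega
  have hrfind1v : PySem.Chars.rfind s kv1.1.toList = (i1 : Int) := by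
    have hnn : 0 ≤ PySem.Chars.rfind s kv1.1.toList :=
      pv_rfind_nonneg (le_of_lt h1lt) hkv1p
    obtain ⟨jj, hjle, heq, hjp, hjmax⟩ := pv_rfind_elim hnn
    have hjlt : jj < s.length := pv_lt_of_isSome (pv_match_at hkv1mem hjp)
    have hub : jj ≤ i1 := by
      by_contra hcon
      have := hmax jj (by omega) hjle
      rw [Option.eq_none_iff_forall_ne_some] at this
      have hs := pv_match_at hkv1mem hjp
      rw [Option.isSome_iff_exists] at hs
      obtain ⟨v, hv⟩ := hs
      exact this v hv
    have hlb : i1 ≤ jj := by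
      by_contra hcon
      exact hjmax i1 (by omega) (le_of_lt h1lt) hkv1p
    rw [heq]
    omega
  have hmem0 : ((kv0.2, (i0 : Int))) ∈ pvCands0 s := by
    refine List.mem_filter.mpr ⟨List.mem_map.mpr ⟨kv0, hkv0mem, ?_⟩, by simp⟩
    rw [hfind0v]
  have hmem1 : ((kv1.2, (i1 : Int))) ∈ pvCands1 s := by
    refine List.mem_filter.mpr ⟨List.mem_map.mpr ⟨kv1, hkv1mem, ?_⟩, by simp⟩
    rw [hrfind1v]
  have hcand0 : ∀ y ∈ pvCands0 s, (i0 : Int) ≤ y.2 ∧ (y.2 = (i0 : Int) → y = (kv0.2, (i0 : Int))) := by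
    intro y hy
    obtain ⟨hy1, hy2⟩ := List.mem_filter.mp hy
    obtain ⟨kv, hkvmem, hkveq⟩ := List.mem_map.mp hy1
    have hnn : 0 ≤ PySem.Chars.find s kv.1.toList := by
      have := of_decide_eq_true hy2
      rw [← hkveq] at this; exact this
    obtain ⟨hpf, _⟩ := PySem.Chars.find_spec hnn
    have hge : i0 ≤ (PySem.Chars.find s kv.1.toList).toNat :=
      Nat.find_min' hex (pv_match_at hkvmem hpf)
    have htn := Int.toNat_of_nonneg hnn
    constructor
    · rw [← hkveq]; simp only []; omega
    · intro hyeq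
      have hfi : PySem.Chars.find s kv.1.toList = (i0 : Int) := by
        rw [← hkveq] at hyeq; exact hyeq
      have : kv.1.toList <+: s.drop i0 := by
        rw [hfi] at hpf; simpa using hpf
      have hkveq2 : kv = kv0 := pv_uniq hkvmem hkv0mem this hkv0p
      rw [← hkveq, hfi, hkveq2]
  have hcand1 : ∀ y ∈ pvCands1 s, y.2 ≤ (i1 : Int) ∧ (y.2 = (i1 : Int) → y = (kv1.2, (i1 : Int))) := by
    intro y hy
    obtain ⟨hy1, hy2⟩ := List.mem_filter.mp hy
    obtain ⟨kv, hkvmem, hkveq⟩ := List.mem_map.mp hy1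
    have hnn : 0 ≤ PySem.Chars.rfind s kv.1.toList := by
      have := of_decide_eq_true hy2
      rw [← hkveq] at this; exact this
    obtain ⟨jj, hjle, heq, hjp, _⟩ := pv_rfind_elim hnn
    have hjlt : jj < s.length := pv_lt_of_isSome (pv_match_at hkvmem hjp)
    have hub : jj ≤ i1 := by
      by_contra hcon
      have := hmax jj (by omega) hjle
      rw [Option.eq_none_iff_forall_ne_some] at this
      have hs' := pv_match_at hkvmem hjp
      rw [Option.isSome_iff_exists] at hs'
      obtain ⟨v, hv⟩ := hs'
      exact this v hv
    constructor
    · rw [← hkveq]; simp only []; rw [heq]; omega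
    · intro hyeq
      have hfi : PySem.Chars.rfind s kv.1.toList = (i1 : Int) := by
        rw [← hkveq] at hyeq; exact hyeq
      have hji : jj = i1 := by rw [hfi] at heq; omega
      have : kv.1.toList <+: s.drop i1 := hji ▸ hjp
      have hkveq2 : kv = kv1 := pv_uniq hkvmem hkv1mem this hkv1p
      rw [← hkveq, hfi, hkveq2]
  -- heads of the sorted candidate lists
  have hhead0 : (PySem.List.sorted (pvCands0 s) (fun vi => vi.2) false).head? = some (kv0.2, (i0 : Int)) := by
    cases hS : PySem.List.sorted (pvCands0 s) (fun vi => vi.2) false with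
    | nil => exact absurd ((PySem.List.sorted_eq_nil_iff _ _ _).mp hS ▸ hmem0) (List.not_mem_nil)
    | cons m t =>
      have hmmem : m ∈ pvCands0 s := (PySem.List.mem_sorted _ _ _ _).mp (hS ▸ List.mem_cons_self)
      have hle := PySem.List.key_head_sorted_le (pvCands0 s) (fun vi => vi.2) hS _ hmem0
      rw [(hcand0 m hmmem).2 (le_antisymm (by simpa using hle) (hcand0 m hmmem).1)]
      rfl
  have hhead1 : (PySem.List.sorted (pvCands1 s) (fun vi => -vi.2) false).head? = some (kv1.2, (i1 : Int)) := by
    cases hS : PySem.List.sorted (pvCands1 s) (fun vi => -vi.2) false with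
    | nil => exact absurd ((PySem.List.sorted_eq_nil_iff _ _ _).mp hS ▸ hmem1) (List.not_mem_nil)
    | cons m t =>
      have hmmem : m ∈ pvCands1 s := (PySem.List.mem_sorted _ _ _ _).mp (hS ▸ List.mem_cons_self)
      have hle := PySem.List.key_head_sorted_le (pvCands1 s) (fun vi => -vi.2) hS _ hmem1
      have hge : (i1 : Int) ≤ m.2 := by simpa using hle
      rw [(hcand1 m hmmem).2 (le_antisymm (hcand1 m hmmem).1 hge)]
      rfl
  -- B side: the positional fold produces the same first/last values
  have hB : pvBLine s = kv0.2 * 10 + kv1.2 := by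
    unfold pvBLine
    rw [show ((s.length : Int)) = ((s.length : Nat) : Int) from rfl,
      PySem.List.pyRange_zero_natCast, List.foldl_map]
    rw [PySem.List.foldl_congr_mem (List.range s.length) _
      (fun (st : Option Int × Option Int) k =>
        match pvG s k with
        | none => st
        | some v => ((match st.1 with | none => some v | some f' => some f'), some v))
      (none, none)
      (fun st k _ => by
        simp only [Int.toNat_natCast, pvG]
        exact pv_inner_fold (List.drop k s) st)]
    rw [pv_outer_fold (pvG s) (List.range s.length) none none]
    rw [pv_head_filterMap_range h0lt hg0 hmin,
      pv_getLast_filterMap_range h1lt hg1 (fun j hj1 hj2 => hmax j hj1 (le_of_lt hj2))]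
    rfl
  rw [hB]
  unfold pvALine
  rw [hhead0, hhead1]
  rfl

theorem pv_line_eq (line : String)
    (hpre : ∃ kv ∈ pvPattern, PySem.Str.isIn kv.1 line = true) :
    part2Line line = part2AltLine line := by
  obtain ⟨kvx, hkvxmem, hin⟩ := hpre
  obtain ⟨j, hj⟩ : ∃ j, kvx.1.toList <+: line.toList.drop j :=
    (PySem.Chars.exists_prefix_drop_iff_isIn _ _).mpr (by rw [← PySem.Str.isIn_eq]; exact hin)
  rw [part2Line_eq, part2AltLine_eq]
  exact pv_core line.toList ⟨j, pv_match_at hkvxmem hj⟩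

-- ===== VERDICT (by name: the statement is the Claim_ definition above) =====
theorem part2_spec : Claim_equal_part2 := by
  intro lines _ hpre
  unfold Spec_part2
  unfold part2 part2_alt
  rw [PySem.List.foldl_append_singleton_eq_map, PySem.List.foldl_append_singleton_eq_map]
  simp only [List.nil_append]
  exact List.map_congr_left (fun line hline => pv_line_eq line (hpre line hline))
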